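-- pv_equiv track=rewrite | github.com/seungdori/TradingBoost-Strategy | shared/indicators/_core.py | pivotlow
-- ===== SOURCE A (Python) =====
-- def pivotlow(series, left_bars, right_bars):
--     """
--     PineScript의 ta.pivotlow(source, leftbars, rightbars) 구현.
--
--     PineScript 방식:
--     - 인덱스 i에서 호출 시, i-leftbars 위치를 pivot 후보로 봄
--     - 좌측 비교: series[i-leftbars-leftbars] ~ series[i-leftbars-1]
--     - 우측 비교: series[i-leftbars+1] ~ series[i-leftbars+rightbars]
--     - pivot이 확정되면 인덱스 i에 저장 (i-leftbars의 값)
--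
--     Args:
--         series: 값 리스트
--         left_bars: 좌측 비교 기간
--         right_bars: 우측 비교 기간
--
--     Returns:
--         list: 각 인덱스의 pivot low 값 (없으면 None)
--               인덱스 i의 값은 i-leftbars 위치의 pivot을 나타냄
--     """
--     result = [None] * len(series)
--
--     # i >= left_bars + right_bars 필요 (충분한 데이터)
--     for i in range(left_bars + right_bars, len(series)):
--         # pivot 후보: i - left_bars
--         pivot_idx = i - left_bars
--         current = series[pivot_idx]
--
--         # NaN 체크
--         if current is None or (isinstance(current, float) and current != current):
--             continue
--
--         # 좌측 비교: pivot_idx - left_bars ~ pivot_idx - 1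
--         is_pivot = True
--         for j in range(pivot_idx - left_bars, pivot_idx):
--             if j < 0:
--                 break
--             if series[j] is None:
--                 continue
--             if series[j] <= current:
--                 is_pivot = False
--                 break
--
--         if not is_pivot:
--             continue
--
--         # 우측 비교: pivot_idx + 1 ~ pivot_idx + right_bars
--         for j in range(pivot_idx + 1, min(pivot_idx + right_bars + 1, len(series))):
--             if series[j] is None:
--                 continue
--             if series[j] <= current:
--                 is_pivot = False
--                 break
--
--         if is_pivot:
--             result[i] = current  # i 위치에 저장 (pivot_idx의 값)
--
--     return result
-- ===== SOURCE B (Python) =====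
-- def _nearest_le_before(vals):
--     """For each index j with vals[j] not None: the index of the nearest previous
--     non-None element <= vals[j], or -1 if there is none (also -1 for None slots).
--     One pass with a monotonic stack of (index, value) pairs."""
--     res = [-1] * len(vals)
--     stack = []
--     for j, v in enumerate(vals):
--         if v is None:
--             continue
--         while stack and stack[-1][1] > v:
--             stack.pop()
--         if stack:
--             res[j] = stack[-1][0]
--         stack.append((j, v))
--     return res
--
--
-- def pivotlow(series, left_bars, right_bars):
--     n = len(series)
--     prev_le = _nearest_le_before(series)
--     rev = _nearest_le_before(series[::-1])
--     next_le = [(n - 1 - rev[n - 1 - p]) if rev[n - 1 - p] >= 0 else -1 for p in range(n)]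
--
--     def piv(i):
--         if i < left_bars + right_bars:
--             return None
--         p = i - left_bars
--         cur = series[p]
--         if cur is None:
--             return None
--         if p - left_bars >= 0 and prev_le[p] >= p - left_bars:
--             return None
--         if next_le[p] != -1 and next_le[p] <= p + right_bars:
--             return None
--         return cur
--
--     return [piv(i) for i in range(n)]
-- ===== Notes on version B (the rewrite author's own statement) =====
-- stated objective: alternative
-- what changed: Replaces the per-candidate nested window scans by two monotonic-stack passes that compute, for every index, the nearest previous and nearest next non-None element <= it; each candidate is then decided by comparing those precomputed indices against its window bounds, with no inner scans.
-- outside the precondition, e.g. on pivotlow([3, 1, 2], 0, -1): A returns [3, 1, 2], B returns [3, 1, 2]; on pivotlow([1, 2, 3], -1, 0): A raises IndexError, B raises IndexError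
import Mathlib
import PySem

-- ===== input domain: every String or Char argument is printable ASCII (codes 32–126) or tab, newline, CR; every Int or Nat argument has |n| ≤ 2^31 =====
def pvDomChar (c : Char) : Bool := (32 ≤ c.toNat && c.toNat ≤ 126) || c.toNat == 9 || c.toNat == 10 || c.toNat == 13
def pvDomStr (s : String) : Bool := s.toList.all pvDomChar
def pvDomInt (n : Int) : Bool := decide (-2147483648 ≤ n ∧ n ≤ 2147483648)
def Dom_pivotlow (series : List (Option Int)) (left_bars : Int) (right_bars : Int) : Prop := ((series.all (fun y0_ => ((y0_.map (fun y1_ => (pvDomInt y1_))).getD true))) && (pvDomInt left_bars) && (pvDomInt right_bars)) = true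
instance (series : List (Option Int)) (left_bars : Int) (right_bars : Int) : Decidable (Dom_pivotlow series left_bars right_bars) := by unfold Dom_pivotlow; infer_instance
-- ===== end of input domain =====

-- B replaces A's per-candidate nested window scans by two monotonic-stack passes (nearest previous /
-- next non-None element ≤ each value); each candidate is then decided by comparing those precomputed
-- indices against its window bounds. Same return value on Pre_ (proved below); no speed claim is made.

-- ===== PORT A =====
-- left comparison loop of A (with its 'if j < 0: break' and 'continue' on None)
def aLeftLoop (series : List (Option Int)) (cur : Int) : List Int → Bool
  | [] => true
  | j :: rest =>
    if j < 0 then true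
    else
      match PySem.List.pyGet? series j with
      | none => true   -- Python IndexError (unreachable for the ranges A builds under Pre_)
      | some none => aLeftLoop series cur rest
      | some (some x) => if x ≤ cur then false else aLeftLoop series cur rest

-- right comparison loop of A
def aRightLoop (series : List (Option Int)) (cur : Int) : List Int → Bool
  | [] => true
  | j :: rest =>
    match PySem.List.pyGet? series j with
    | none => true   -- Python IndexError (unreachable: the range is clipped by min(..., n))
    | some none => aRightLoop series cur rest
    | some (some x) => if x ≤ cur then false else aRightLoop series cur rest

def pivotlow (series : List (Option Int)) (left_bars : Int) (right_bars : Int) : List (Option Int) :=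
  let n : Int := series.length
  (PySem.List.pyRange (left_bars + right_bars) n 1).foldl
    (fun result i =>
      let p : Int := i - left_bars
      match PySem.List.pyGet? series p with
      | none => result          -- Python IndexError (outside Pre_)
      | some none => result     -- 'continue' (the float-NaN test is always false on ints)
      | some (some cur) =>
        if aLeftLoop series cur (PySem.List.pyRange (p - left_bars) p 1) then
          if aRightLoop series cur (PySem.List.pyRange (p + 1) (min (p + right_bars + 1) n) 1) then
            PySem.List.pySetD result i (some cur)
          else result
        else result)
    (List.replicate series.length none)

-- ===== PORT B =====
-- 'while stack and stack[-1][1] > v: stack.pop()'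
def popGT (c : Int) : List (Int × Int) → List (Int × Int)
  | [] => []
  | q :: s => if c < q.2 then popGT c s else q :: s

-- _nearest_le_before from Source B: one pass with a monotonic stack of (index, value) pairs
def nearestLEBefore (vals : List (Option Int)) : List Int :=
  ((PySem.List.enumerate vals 0).foldl
    (fun st e =>
      match e.2 with
      | none => st
      | some c =>
        let s' := popGT c st.2
        let res' := match s' with
          | [] => st.1
          | q :: _ => st.1.set e.1.toNat q.1
        (res', (e.1, c) :: s'))
    (List.replicate vals.length (-1), [])).1

def pivotlow_alt (series : List (Option Int)) (left_bars : Int) (right_bars : Int) : List (Option Int) :=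
  let n : Int := series.length
  let prevLE := nearestLEBefore series
  let rev := nearestLEBefore series.reverse
  let nextLE := (PySem.List.pyRange 0 n 1).map (fun p =>
    let r := PySem.List.pyGetD rev (n - 1 - p) (-1)
    if 0 ≤ r then n - 1 - r else -1)
  (PySem.List.pyRange 0 n 1).map (fun i =>
    if i < left_bars + right_bars then none
    else
      let p : Int := i - left_bars
      match PySem.List.pyGet? series p with
      | none => none            -- Python IndexError (outside Pre_)
      | some none => none
      | some (some cur) =>
        if 0 ≤ p - left_bars ∧ p - left_bars ≤ PySem.List.pyGetD prevLE p (-1) then none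
        else if PySem.List.pyGetD nextLE p (-1) ≠ -1 ∧ PySem.List.pyGetD nextLE p (-1) ≤ p + right_bars then none
        else some cur)

-- ===== PRECONDITION & SPEC =====
-- Pre_ keeps the natural domain of bar counts: on negative left_bars/right_bars A either raises
-- IndexError or reads/writes through Python negative-index wraparound (an artefact, not a spec).
def Pre_pivotlow (series : List (Option Int)) (left_bars : Int) (right_bars : Int) : Prop :=
  0 ≤ left_bars ∧ 0 ≤ right_bars
instance (series : List (Option Int)) (left_bars : Int) (right_bars : Int) : Decidable (Pre_pivotlow series left_bars right_bars) := by unfold Pre_pivotlow; infer_instance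

def pvWitness_pivotlow : List (Option Int) × Int × Int := ([some 3, some 1, some 2, none, some 5, some 0, some 4], 1, 1)

def Spec_pivotlow (series : List (Option Int)) (left_bars : Int) (right_bars : Int) (out : List (Option Int)) : Prop := out = pivotlow_alt series left_bars right_bars
instance (series : List (Option Int)) (left_bars : Int) (right_bars : Int) (out : List (Option Int)) : Decidable (Spec_pivotlow series left_bars right_bars out) := by unfold Spec_pivotlow; infer_instance

-- ===== CLAIM (what is proved, stated in full; the proofs are below) =====
def Claim_equal_pivotlow : Prop := ∀ (series : List (Option Int)) (left_bars : Int) (right_bars : Int), Dom_pivotlow series left_bars right_bars → Pre_pivotlow series left_bars right_bars → Spec_pivotlow series left_bars right_bars (pivotlow series left_bars right_bars)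

-- ===== LEMMAS AND PROOFS =====

-- 'there is a non-None element ≤ c at index k' (false out of range)
def goodb (vals : List (Option Int)) (c : Int) (k : Nat) : Bool :=
  match vals[k]? with
  | some (some y) => decide (y ≤ c)
  | _ => false

-- greatest k < j with goodb, if any
def maxGood (vals : List (Option Int)) (c : Int) : Nat → Option Nat
  | 0 => none
  | j+1 => if goodb vals c j then some j else maxGood vals c j

-- some index in the half-open Int window [a, b) is good
def windowBad (vals : List (Option Int)) (c : Int) (a b : Int) : Bool :=
  (List.range vals.length).any (fun k => decide (a ≤ (k:Int)) && decide ((k:Int) < b) && goodb vals c k)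

-- the value _nearest_le_before stores at slot j
def prevIdxSpec (vals : List (Option Int)) (j : Nat) : Int :=
  match vals[j]? with
  | some (some c) =>
    match maxGood vals c j with
    | some m => (m:Int)
    | none => -1
  | _ => -1

-- the common per-index description both ports are reduced to
def specEntry (series : List (Option Int)) (L R : Int) (i : Nat) : Option Int :=
  if (i:Int) < L + R then none
  else
    match series[((i:Int) - L).toNat]? with
    | some (some cur) =>
      if 0 ≤ (i:Int) - L - L ∧ windowBad series cur ((i:Int) - L - L) ((i:Int) - L) then none
      else if windowBad series cur ((i:Int) - L + 1) (min ((i:Int) - L + R + 1) (series.length:Int)) then none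
      else some cur
    | _ => none

lemma goodb_false_of_ge (vals : List (Option Int)) (c : Int) (k : Nat) (h : vals.length ≤ k) :
    goodb vals c k = false := by
  unfold goodb
  rw [List.getElem?_eq_none (by omega)]

lemma lt_length_of_goodb (vals : List (Option Int)) (c : Int) (k : Nat) (h : goodb vals c k = true) :
    k < vals.length := by
  by_contra hk
  rw [goodb_false_of_ge vals c k (by omega)] at h
  exact Bool.false_ne_true h

lemma windowBad_iff (vals : List (Option Int)) (c : Int) (a b : Int) :
    windowBad vals c a b = true ↔ ∃ k : Nat, a ≤ (k:Int) ∧ (k:Int) < b ∧ goodb vals c k = true := by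
  unfold windowBad
  rw [List.any_eq_true]
  constructor
  · rintro ⟨k, _, hk⟩
    simp only [Bool.and_eq_true, decide_eq_true_eq] at hk
    exact ⟨k, hk.1.1, hk.1.2, hk.2⟩
  · rintro ⟨k, h1, h2, h3⟩
    refine ⟨k, List.mem_range.mpr (lt_length_of_goodb _ _ _ h3), ?_⟩
    simp [h1, h2, h3]

lemma maxGood_some (vals : List (Option Int)) (c : Int) (j m : Nat) (h : maxGood vals c j = some m) :
    m < j ∧ goodb vals c m = true ∧ ∀ k, m < k → k < j → goodb vals c k = false := by
  induction j with
  | zero => simp [maxGood] at h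
  | succ j ih =>
    unfold maxGood at h
    by_cases hg : goodb vals c j = true
    · rw [if_pos hg] at h
      cases h
      exact ⟨by omega, hg, by omega⟩
    · rw [if_neg hg] at h
      obtain ⟨h1, h2, h3⟩ := ih h
      refine ⟨by omega, h2, fun k hk1 hk2 => ?_⟩
      by_cases hkj : k = j
      · subst hkj; exact Bool.eq_false_iff.mpr hg
      · exact h3 k hk1 (by omega)

lemma maxGood_none (vals : List (Option Int)) (c : Int) (j : Nat) (h : maxGood vals c j = none) :
    ∀ k, k < j → goodb vals c k = false := by
  induction j with
  | zero => omega
  | succ j ih =>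
    unfold maxGood at h
    by_cases hg : goodb vals c j = true
    · rw [if_pos hg] at h; cases h
    · rw [if_neg hg] at h
      intro k hk
      by_cases hkj : k = j
      · subst hkj; exact Bool.eq_false_iff.mpr hg
      · exact ih h k (by omega)

-- ---- stack pass correctness ----

lemma popGT_sublist (c : Int) (s : List (Int × Int)) : (popGT c s).Sublist s := by
  induction s with
  | nil => simp [popGT]
  | cons q s ih =>
    unfold popGT
    by_cases h : c < q.2
    · rw [if_pos h]; exact ih.cons q
    · rw [if_neg h]

lemma popGT_mem (c : Int) (s : List (Int × Int))
    (hs : s.Pairwise (fun a b => b.1 < a.1 ∧ b.2 ≤ a.2)) :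
    ∀ q, q ∈ popGT c s ↔ q ∈ s ∧ q.2 ≤ c := by
  induction s with
  | nil => simp [popGT]
  | cons q0 s ih =>
    rw [List.pairwise_cons] at hs
    intro q
    unfold popGT
    by_cases h : c < q0.2
    · rw [if_pos h, ih hs.2]
      constructor
      · rintro ⟨h1, h2⟩; exact ⟨List.mem_cons_of_mem _ h1, h2⟩
      · rintro ⟨h1, h2⟩
        rcases List.mem_cons.mp h1 with h1 | h1
        · subst h1; omega
        · exact ⟨h1, h2⟩
    · rw [if_neg h]
      constructor
      · intro hq
        refine ⟨hq, ?_⟩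
        rcases List.mem_cons.mp hq with h1 | h1
        · subst h1; omega
        · have := (hs.1 q h1).2; omega
      · exact fun hq => hq.1

-- the invariant of the _nearest_le_before fold after t processed elements
def SInv (vals : List (Option Int)) (t : Nat) (res : List Int) (stack : List (Int × Int)) : Prop :=
  res.length = vals.length ∧
  stack.Pairwise (fun a b => b.1 < a.1 ∧ b.2 ≤ a.2) ∧
  (∀ q ∈ stack, 0 ≤ q.1) ∧
  (∀ (j : Nat) (x : Int), ((j:Int), x) ∈ stack ↔
    (j < t ∧ vals[j]? = some (some x) ∧
      ∀ (k : Nat) (y : Int), j < k → k < t → vals[k]? = some (some y) → x ≤ y)) ∧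
  (∀ j : Nat, j < vals.length → res[j]? = some (if j < t then prevIdxSpec vals j else -1))

-- the fold body of nearestLEBefore, named for the proofs
def stepNLB (st : List Int × List (Int × Int)) (e : Int × Option Int) : List Int × List (Int × Int) :=
  match e.2 with
  | none => st
  | some c =>
    let s' := popGT c st.2
    let res' := match s' with
      | [] => st.1
      | q :: _ => st.1.set e.1.toNat q.1
    (res', (e.1, c) :: s')

lemma nearestLEBefore_eq_fold (vals : List (Option Int)) :
    nearestLEBefore vals =
      ((PySem.List.enumerate vals 0).foldl stepNLB (List.replicate vals.length (-1), [])).1 := rfl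

lemma prevIdxSpec_of_not_some (vals : List (Option Int)) (t : Nat)
    (h : ∀ c : Int, vals[t]? ≠ some (some c)) : prevIdxSpec vals t = -1 := by
  unfold prevIdxSpec
  cases hv : vals[t]? with
  | none => rfl
  | some v =>
    cases v with
    | none => rfl
    | some c => exact absurd hv (h c)

lemma SInv_step (vals : List (Option Int)) (t : Nat) (res : List Int) (stack : List (Int × Int))
    (hinv : SInv vals t res stack) (v : Option Int) (hvt : vals[t]? = some v) :
    SInv vals (t + 1) (stepNLB (res, stack) ((t:Int), v)).1 (stepNLB (res, stack) ((t:Int), v)).2 := by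
  obtain ⟨hlen, hpw, hnn, hmem, hres⟩ := hinv
  have htn : t < vals.length := by
    by_contra hc
    rw [List.getElem?_eq_none (by omega)] at hvt
    cases hvt
  cases v with
  | none =>
    show SInv vals (t + 1) res stack
    refine ⟨hlen, hpw, hnn, ?_, ?_⟩
    · intro j x
      rw [hmem j x]
      constructor
      · rintro ⟨h1, h2, h3⟩
        refine ⟨by omega, h2, fun k y hk1 hk2 hk3 => ?_⟩
        by_cases hkt : k = t
        · subst hkt; rw [hvt] at hk3; cases hk3
        · exact h3 k y hk1 (by omega) hk3
      · rintro ⟨h1, h2, h3⟩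
        have hjt : j ≠ t := by
          intro hj; subst hj; rw [hvt] at h2; cases h2
        exact ⟨by omega, h2, fun k y hk1 hk2 hk3 => h3 k y hk1 (by omega) hk3⟩
    · intro j hj
      rw [hres j hj]
      by_cases hjt : j < t
      · rw [if_pos hjt, if_pos (by omega)]
      · rw [if_neg hjt]
        by_cases hjt1 : j < t + 1
        · rw [if_pos hjt1]
          have hjeq : j = t := by omega
          subst hjeq
          rw [prevIdxSpec_of_not_some vals j (by intro c hc; rw [hvt] at hc; cases hc)]
        · rw [if_neg hjt1]
  | some c =>
    -- every stack element is a processed (index, value) pair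
    have hql : ∀ q ∈ stack, q.1 < (t:Int) ∧ vals[q.1.toNat]? = some (some q.2) ∧
        (∀ (k : Nat) (y : Int), q.1.toNat < k → k < t → vals[k]? = some (some y) → q.2 ≤ y) := by
      intro q hq
      have h0 := hnn q hq
      have hq' : ((q.1.toNat : Int), q.2) ∈ stack := by
        rw [Int.toNat_of_nonneg h0]
        exact hq
      obtain ⟨h1, h2, h3⟩ := (hmem q.1.toNat q.2).mp hq'
      exact ⟨by omega, h2, h3⟩
    have hpop := popGT_mem c stack hpw
    have hsub := popGT_sublist c stack
    have hpw' : (popGT c stack).Pairwise (fun a b => b.1 < a.1 ∧ b.2 ≤ a.2) := hpw.sublist hsub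
    have hmem' : ∀ (j : Nat) (x : Int), ((j:Int), x) ∈ (((t:Int), c) :: popGT c stack) ↔
        (j < t + 1 ∧ vals[j]? = some (some x) ∧
          ∀ (k : Nat) (y : Int), j < k → k < t + 1 → vals[k]? = some (some y) → x ≤ y) := by
      intro j x
      rw [List.mem_cons]
      constructor
      · rintro (h | h)
        · have hj1 : j = t := by
            have : (j:Int) = (t:Int) := congrArg Prod.fst h
            omega
          have hj2 : x = c := congrArg Prod.snd h
          subst hj1; subst hj2
          exact ⟨by omega, hvt, fun k y hk1 hk2 hk3 => by omega⟩
        · obtain ⟨hs, hxc⟩ := (hpop _).mp h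
          obtain ⟨h1, h2, h3⟩ := (hmem j x).mp hs
          refine ⟨by omega, h2, fun k y hk1 hk2 hk3 => ?_⟩
          by_cases hkt : k = t
          · subst hkt
            rw [hvt] at hk3
            have : y = c := by cases hk3; rfl
            omega
          · exact h3 k y hk1 (by omega) hk3
      · rintro ⟨h1, h2, h3⟩
        by_cases hjt : j = t
        · subst hjt
          left
          rw [hvt] at h2
          have : c = x := by cases h2; rfl
          rw [this]
        · right
          have hjlt : j < t := by omega
          have hins : ((j:Int), x) ∈ stack := by
            rw [hmem j x]
            exact ⟨hjlt, h2, fun k y hk1 hk2 hk3 => h3 k y hk1 (by omega) hk3⟩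
          rw [hpop]
          exact ⟨hins, h3 t c hjlt (by omega) hvt⟩
    show SInv vals (t+1)
      (match popGT c stack with
        | [] => res
        | q :: _ => res.set ((t:Int)).toNat q.1)
      (((t:Int), c) :: popGT c stack)
    cases hs' : popGT c stack with
    | nil =>
      -- nothing ≤ c was seen before t
      have hmg : maxGood vals c t = none := by
        cases hmg : maxGood vals c t with
        | none => rfl
        | some m =>
          exfalso
          obtain ⟨hm1, hm2, hm3⟩ := maxGood_some vals c t m hmg
          unfold goodb at hm2
          cases hmv : vals[m]? with
          | none => rw [hmv] at hm2; cases hm2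
          | some w =>
            cases w with
            | none => rw [hmv] at hm2; cases hm2
            | some y =>
              rw [hmv] at hm2
              have hyc : y ≤ c := by simpa using hm2
              have hins : ((m:Int), y) ∈ stack := by
                rw [hmem m y]
                refine ⟨hm1, hmv, fun k y' hk1 hk2 hk3 => ?_⟩
                have hbad := hm3 k hk1 hk2
                unfold goodb at hbad
                rw [hk3] at hbad
                have : ¬ (y' ≤ c) := by simpa using hbad
                omega
              have hinpop : ((m:Int), y) ∈ popGT c stack := (hpop _).mpr ⟨hins, hyc⟩
              rw [hs'] at hinpop
              cases hinpop
      refine ⟨hlen, ?_, ?_, by rw [← hs']; exact hmem', ?_⟩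
      · rw [List.pairwise_cons]
        exact ⟨by intro q hq; simp at hq, List.Pairwise.nil⟩
      · rintro q hq
        rcases List.mem_cons.mp hq with h | h
        · subst h; simp
        · simp at h
      · intro j hj
        show res[j]? = some (if j < t + 1 then prevIdxSpec vals j else -1)
        rw [hres j hj]
        by_cases hjt : j < t
        · rw [if_pos hjt, if_pos (by omega)]
        · rw [if_neg hjt]
          by_cases hjt1 : j < t + 1
          · rw [if_pos hjt1]
            have hjeq : j = t := by omega
            subst hjeq
            unfold prevIdxSpec
            rw [hvt]
            show some (-1 : Int) = some (match maxGood vals c j with | some m => (m:Int) | none => -1)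
            rw [hmg]
          · rw [if_neg hjt1]
    | cons q rest =>
      -- q is the nearest previous (index, value) with value ≤ c
      have hqmem : q ∈ popGT c stack := by rw [hs']; exact List.mem_cons_self
      obtain ⟨hqs, hqc⟩ := (hpop q).mp hqmem
      obtain ⟨hq1, hq2, hq3⟩ := hql q hqs
      have hq0 : 0 ≤ q.1 := hnn q hqs
      have hgq : goodb vals c q.1.toNat = true := by
        unfold goodb
        rw [hq2]
        simpa using hqc
      have hmg : maxGood vals c t = some q.1.toNat := by
        cases hmg : maxGood vals c t with
        | none =>
          exfalso
          rw [maxGood_none vals c t hmg q.1.toNat (by omega)] at hgq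
          cases hgq
        | some m' =>
          obtain ⟨hm1, hm2, hm3⟩ := maxGood_some vals c t m' hmg
          have hle : q.1.toNat ≤ m' := by
            by_contra hc2
            rw [hm3 q.1.toNat (by omega) (by omega)] at hgq
            cases hgq
          have hge : m' ≤ q.1.toNat := by
            by_contra hc2
            -- m' would sit above q in the popped stack, contradicting that q is its head
            unfold goodb at hm2
            cases hmv : vals[m']? with
            | none => rw [hmv] at hm2; cases hm2
            | some w =>
              cases w with
              | none => rw [hmv] at hm2; cases hm2
              | some y' =>
                rw [hmv] at hm2
                have hyc : y' ≤ c := by simpa using hm2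
                have hins : ((m':Int), y') ∈ stack := by
                  rw [hmem m' y']
                  refine ⟨hm1, hmv, fun k y'' hk1 hk2 hk3 => ?_⟩
                  have hbad := hm3 k hk1 hk2
                  unfold goodb at hbad
                  rw [hk3] at hbad
                  have : ¬ (y'' ≤ c) := by simpa using hbad
                  omega
                have hin' : ((m':Int), y') ∈ popGT c stack := (hpop _).mpr ⟨hins, hyc⟩
                rw [hs'] at hin'
                rcases List.mem_cons.mp hin' with h | h
                · have : (m':Int) = q.1 := congrArg Prod.fst h
                  omega
                · rw [hs'] at hpw'
                  rw [List.pairwise_cons] at hpw'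
                  have hlt : (m':Int) < q.1 := (hpw'.1 _ h).1
                  omega
          have heq : m' = q.1.toNat := by omega
          rw [heq]
      rw [hs'] at hpw'
      refine ⟨?_, ?_, ?_, by rw [← hs']; exact hmem', ?_⟩
      · show (res.set ((t:Int)).toNat q.1).length = vals.length
        rw [List.length_set]; exact hlen
      · rw [List.pairwise_cons]
        refine ⟨?_, hpw'⟩
        intro q' hq'
        rw [← hs'] at hq'
        obtain ⟨hq's, hq'c⟩ := (hpop q').mp hq'
        exact ⟨by have := (hql q' hq's).1; omega, hq'c⟩
      · rintro q' hq'
        rcases List.mem_cons.mp hq' with h | h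
        · subst h; simp
        · rw [← hs'] at h
          exact hnn q' ((hpop q').mp h).1
      · intro j hj
        show (res.set ((t:Int)).toNat q.1)[j]? = some (if j < t + 1 then prevIdxSpec vals j else -1)
        have htres : ((t:Int)).toNat = t := by omega
        rw [htres]
        by_cases hjt : j = t
        · subst hjt
          rw [List.getElem?_set_self (by omega)]
          rw [if_pos (by omega)]
          unfold prevIdxSpec
          rw [hvt]
          show some q.1 = some (match maxGood vals c j with | some m => (m:Int) | none => -1)
          rw [hmg]
          show some q.1 = some ((q.1.toNat : Int))
          rw [Int.toNat_of_nonneg hq0]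
        · rw [List.getElem?_set_ne (by omega)]
          rw [hres j hj]
          by_cases hjlt : j < t
          · rw [if_pos hjlt, if_pos (by omega)]
          · rw [if_neg hjlt, if_neg (by omega)]

lemma nlb_fold (vals : List (Option Int)) :
    ∀ (l : List (Option Int)) (t : Nat) (res : List Int) (stack : List (Int × Int)),
      vals.drop t = l → SInv vals t res stack →
      SInv vals (t + l.length)
        ((PySem.List.enumerate l (t:Int)).foldl stepNLB (res, stack)).1
        ((PySem.List.enumerate l (t:Int)).foldl stepNLB (res, stack)).2 := by
  intro l
  induction l with
  | nil =>
    intro t res stack _ hinv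
    rw [PySem.List.enumerate_nil]
    simpa using hinv
  | cons v l' ih =>
    intro t res stack hdrop hinv
    have hvt : vals[t]? = some v := by
      have h0 : (vals.drop t)[0]? = some v := by rw [hdrop]; rfl
      rw [List.getElem?_drop] at h0
      simpa using h0
    have hdrop' : vals.drop (t + 1) = l' := by
      have : (vals.drop t).tail = vals.drop (t + 1) := List.tail_drop
      rw [hdrop] at this
      exact this.symm
    rw [PySem.List.enumerate_cons]
    rw [List.foldl_cons]
    have hstep := SInv_step vals t res stack hinv v hvt
    have hcast : ((t:Int) + 1) = (((t + 1 : Nat)):Int) := by omega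
    have := ih (t + 1) (stepNLB (res, stack) ((t:Int), v)).1 (stepNLB (res, stack) ((t:Int), v)).2 hdrop' hstep
    rw [hcast]
    have hl : t + 1 + l'.length = t + (v :: l').length := by simp; omega
    rw [hl] at this
    simpa using this

lemma SInv_init (vals : List (Option Int)) :
    SInv vals 0 (List.replicate vals.length (-1)) [] := by
  refine ⟨by simp, List.Pairwise.nil, ?_, ?_, ?_⟩
  · intro q hq
    cases hq
  · intro j x
    constructor
    · rintro h; cases h
    · rintro ⟨h, _⟩; omega
  · intro j hj
    rw [List.getElem?_replicate, if_pos hj]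
    rfl

lemma nearestLEBefore_spec (vals : List (Option Int)) :
    (nearestLEBefore vals).length = vals.length ∧
    ∀ j : Nat, j < vals.length → (nearestLEBefore vals)[j]? = some (prevIdxSpec vals j) := by
  have h := nlb_fold vals vals 0 (List.replicate vals.length (-1)) [] (by simp) (SInv_init vals)
  rw [nearestLEBefore_eq_fold]
  obtain ⟨h1, _, _, _, h5⟩ := h
  constructor
  · simpa using h1
  · intro j hj
    have := h5 j hj
    rw [if_pos (by omega)] at this
    simpa using this

lemma length_nearestLEBefore (vals : List (Option Int)) :
    (nearestLEBefore vals).length = vals.length := (nearestLEBefore_spec vals).1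

lemma nearestLEBefore_get (vals : List (Option Int)) (j : Nat) (hj : j < vals.length) :
    (nearestLEBefore vals)[j]? = some (prevIdxSpec vals j) := (nearestLEBefore_spec vals).2 j hj

-- ---- translating B's index tests into window predicates ----

lemma goodb_reverse (vals : List (Option Int)) (c : Int) (k : Nat) (hk : k < vals.length) :
    goodb vals.reverse c k = goodb vals c (vals.length - 1 - k) := by
  unfold goodb
  rw [List.getElem?_reverse (by simpa using hk)]

lemma prev_window_iff (vals : List (Option Int)) (p : Nat) (cur : Int) (a : Int)
    (hp : vals[p]? = some (some cur)) (ha : 0 ≤ a) :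
    (a ≤ prevIdxSpec vals p ↔ windowBad vals cur a p = true) := by
  cases hm : maxGood vals cur p with
  | none =>
    have hred : prevIdxSpec vals p = -1 := by
      unfold prevIdxSpec
      rw [hp]
      show (match maxGood vals cur p with | some m => (m:Int) | none => -1) = _
      rw [hm]
    rw [hred]
    constructor
    · intro h; omega
    · intro h
      rw [windowBad_iff] at h
      obtain ⟨k, h1, h2, h3⟩ := h
      rw [maxGood_none vals cur p hm k (by omega)] at h3
      cases h3
  | some m =>
    have hred : prevIdxSpec vals p = (m:Int) := by
      unfold prevIdxSpec
      rw [hp]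
      show (match maxGood vals cur p with | some m => (m:Int) | none => -1) = _
      rw [hm]
    rw [hred]
    obtain ⟨hm1, hm2, hm3⟩ := maxGood_some vals cur p m hm
    rw [windowBad_iff]
    constructor
    · intro h
      exact ⟨m, by omega, by omega, hm2⟩
    · rintro ⟨k, h1, h2, h3⟩
      have hkm : k ≤ m := by
        by_contra hc
        rw [hm3 k (by omega) (by omega)] at h3
        cases h3
      omega

lemma next_window_iff (vals : List (Option Int)) (p : Nat) (cur : Int) (b : Int)
    (hp : vals[p]? = some (some cur)) (r : Int)
    (hr : r = prevIdxSpec vals.reverse (vals.length - 1 - p)) :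
    (((if 0 ≤ r then (vals.length:Int) - 1 - r else -1) ≠ -1 ∧
      (if 0 ≤ r then (vals.length:Int) - 1 - r else -1) ≤ b)
      ↔ windowBad vals cur ((p:Int) + 1) (min (b + 1) (vals.length:Int)) = true) := by
  have hpn : p < vals.length := by
    by_contra hc
    rw [List.getElem?_eq_none (by omega)] at hp
    cases hp
  have hrevp : vals.reverse[vals.length - 1 - p]? = some (some cur) := by
    rw [List.getElem?_reverse (by simpa using (by omega : vals.length - 1 - p < vals.length))]
    have : vals.length - 1 - (vals.length - 1 - p) = p := by omega
    rw [this]; exact hp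
  cases hm : maxGood vals.reverse cur (vals.length - 1 - p) with
  | none =>
    have hred : prevIdxSpec vals.reverse (vals.length - 1 - p) = -1 := by
      unfold prevIdxSpec
      rw [hrevp]
      show (match maxGood vals.reverse cur (vals.length - 1 - p) with | some m => (m:Int) | none => -1) = _
      rw [hm]
    rw [hred] at hr
    subst hr
    rw [if_neg (by omega)]
    constructor
    · intro h; exact absurd rfl h.1
    · intro h
      exfalso
      rw [windowBad_iff] at h
      obtain ⟨k, h1, h2, h3⟩ := h
      have hkn : k < vals.length := by omega
      have := maxGood_none vals.reverse cur (vals.length - 1 - p) hm (vals.length - 1 - k) (by omega)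
      rw [goodb_reverse vals cur _ (by omega)] at this
      have hk : vals.length - 1 - (vals.length - 1 - k) = k := by omega
      rw [hk] at this
      rw [this] at h3
      cases h3
  | some m =>
    have hred : prevIdxSpec vals.reverse (vals.length - 1 - p) = (m:Int) := by
      unfold prevIdxSpec
      rw [hrevp]
      show (match maxGood vals.reverse cur (vals.length - 1 - p) with | some m => (m:Int) | none => -1) = _
      rw [hm]
    rw [hred] at hr
    subst hr
    obtain ⟨hm1, hm2, hm3⟩ := maxGood_some vals.reverse cur (vals.length - 1 - p) m hm
    rw [goodb_reverse vals cur m (by omega)] at hm2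
    rw [if_pos (by omega)]
    rw [windowBad_iff]
    have hq : ((vals.length:Int) - 1 - m) = ((vals.length - 1 - m : Nat) : Int) := by omega
    constructor
    · rintro ⟨_, hle⟩
      exact ⟨vals.length - 1 - m, by omega, by omega, hm2⟩
    · rintro ⟨k, h1, h2, h3⟩
      have hkn : k < vals.length := by omega
      have hkm : vals.length - 1 - k ≤ m := by
        by_contra hc
        have := hm3 (vals.length - 1 - k) (by omega) (by omega)
        rw [goodb_reverse vals cur _ (by omega)] at this
        have hk : vals.length - 1 - (vals.length - 1 - k) = k := by omega
        rw [hk] at this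
        rw [this] at h3
        cases h3
      constructor
      · omega
      · omega

-- ---- A's loops as window predicates ----

lemma aLeft_eq_aRight (series : List (Option Int)) (cur : Int) (l : List Int)
    (h : ∀ j ∈ l, 0 ≤ j) : aLeftLoop series cur l = aRightLoop series cur l := by
  induction l with
  | nil => rfl
  | cons j rest ih =>
    have hj : ¬ j < 0 := by have := h j (List.mem_cons_self); omega
    have hr := ih (fun x hx => h x (List.mem_cons_of_mem _ hx))
    unfold aLeftLoop aRightLoop
    rw [if_neg hj]
    cases hg : PySem.List.pyGet? series j with
    | none => rfl
    | some v => cases v with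
      | none => exact hr
      | some x => by_cases hx : x ≤ cur <;> simp [hx, hr]

lemma aRight_range (series : List (Option Int)) (cur : Int) :
    ∀ (a b : Int), 0 ≤ a →
    (aRightLoop series cur (PySem.List.pyRange a b 1) = true ↔
      ∀ k : Nat, a ≤ (k:Int) → (k:Int) < b → goodb series cur k = false) := by
  intro a b
  induction hfuel : (b - a).toNat generalizing a with
  | zero =>
    intro ha
    rw [PySem.List.pyRange_one_eq_nil (by omega)]
    constructor
    · intro _ k h1 h2; omega
    · intro _; rfl
  | succ f ih =>
    intro ha
    have hab : a < b := by omega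
    rw [PySem.List.pyRange_one_cons hab]
    have hrest := ih (a + 1) (by omega) (by omega)
    cases hg : series[a.toNat]? with
    | none =>
      -- a is out of range: a ≥ length; every k in [a,b) is out of range too
      have hlen : (series.length : Int) ≤ a := by
        rw [List.getElem?_eq_none_iff] at hg
        omega
      simp only [aRightLoop, PySem.List.pyGet?_of_nonneg series ha, hg]
      constructor
      · intro _ k h1 h2
        have : series.length ≤ k := by omega
        unfold goodb
        rw [List.getElem?_eq_none (by omega)]
      · intro _; trivial
    | some v =>
      have hgv := hg
      cases v with
      | none =>
        simp only [aRightLoop, PySem.List.pyGet?_of_nonneg series ha, hg]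
        rw [hrest]
        have hga : goodb series cur a.toNat = false := by unfold goodb; rw [hgv]
        constructor
        · intro h k h1 h2
          by_cases hk : (k:Int) = a
          · have : k = a.toNat := by omega
            subst this; exact hga
          · exact h k (by omega) h2
        · intro h k h1 h2; exact h k (by omega) h2
      | some x =>
        simp only [aRightLoop, PySem.List.pyGet?_of_nonneg series ha, hg]
        by_cases hx : x ≤ cur
        · rw [if_pos hx]
          constructor
          · intro h; cases h
          · intro h
            have := h a.toNat (by omega) (by omega)
            unfold goodb at this
            rw [hgv] at this
            simp [hx] at this
        · rw [if_neg hx, hrest]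
          have hga : goodb series cur a.toNat = false := by
            unfold goodb; rw [hgv]; simp [hx]
          constructor
          · intro h k h1 h2
            by_cases hk : (k:Int) = a
            · have : k = a.toNat := by omega
              subst this; exact hga
            · exact h k (by omega) h2
          · intro h k h1 h2; exact h k (by omega) h2


lemma aLeft_neg (series : List (Option Int)) (cur : Int) (a b : Int) (ha : a < 0) (hab : a < b) :
    aLeftLoop series cur (PySem.List.pyRange a b 1) = true := by
  rw [PySem.List.pyRange_one_cons hab]
  unfold aLeftLoop
  rw [if_pos ha]

-- ---- per-index characterisations of the two ports ----

-- the body of A's outer loop, named for the proofs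
def stepA (series : List (Option Int)) (left_bars right_bars : Int)
    (result : List (Option Int)) (i : Int) : List (Option Int) :=
  let p : Int := i - left_bars
  match PySem.List.pyGet? series p with
  | none => result
  | some none => result
  | some (some cur) =>
    if aLeftLoop series cur (PySem.List.pyRange (p - left_bars) p 1) then
      if aRightLoop series cur (PySem.List.pyRange (p + 1) (min (p + right_bars + 1) (series.length:Int)) 1) then
        PySem.List.pySetD result i (some cur)
      else result
    else result

lemma pivotlow_eq_fold (series : List (Option Int)) (L R : Int) :
    pivotlow series L R =
      (PySem.List.pyRange (L + R) (series.length:Int) 1).foldl (stepA series L R)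
        (List.replicate series.length none) := rfl

lemma length_stepA (series : List (Option Int)) (L R : Int) (res : List (Option Int)) (i : Int) :
    (stepA series L R res i).length = res.length := by
  simp only [stepA]
  cases PySem.List.pyGet? series (i - L) with
  | none => rfl
  | some v =>
    cases v with
    | none => rfl
    | some cur =>
      show (if aLeftLoop series cur (PySem.List.pyRange (i - L - L) (i - L) 1) = true then
              if aRightLoop series cur (PySem.List.pyRange (i - L + 1) (min (i - L + R + 1) (series.length:Int)) 1) = true then
                PySem.List.pySetD res i (some cur)
              else res
            else res).length = res.length
      split
      · split
        · exact PySem.List.length_pySetD _ _ _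
        · rfl
      · rfl

lemma length_foldl_stepA (series : List (Option Int)) (L R : Int) :
    ∀ (l : List Int) (res : List (Option Int)), (l.foldl (stepA series L R) res).length = res.length := by
  intro l
  induction l with
  | nil => intro res; rfl
  | cons j rest ih =>
    intro res
    rw [List.foldl_cons, ih, length_stepA]

lemma length_pivotlow (series : List (Option Int)) (L R : Int) :
    (pivotlow series L R).length = series.length := by
  rw [pivotlow_eq_fold, length_foldl_stepA, List.length_replicate]

lemma aRight_eq_not_windowBad (series : List (Option Int)) (cur : Int) (a b : Int) (ha : 0 ≤ a) :
    aRightLoop series cur (PySem.List.pyRange a b 1) = ! windowBad series cur a b := by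
  cases hw : windowBad series cur a b with
  | false =>
    show _ = true
    rw [aRight_range series cur a b ha]
    intro k h1 h2
    by_contra hg
    have : windowBad series cur a b = true :=
      (windowBad_iff series cur a b).mpr ⟨k, h1, h2, Bool.not_eq_false _ ▸ (by simpa using hg)⟩
    rw [hw] at this
    cases this
  | true =>
    show _ = false
    obtain ⟨k, h1, h2, h3⟩ := (windowBad_iff series cur a b).mp hw
    cases haR : aRightLoop series cur (PySem.List.pyRange a b 1) with
    | false => rfl
    | true =>
      exfalso
      have := (aRight_range series cur a b ha).mp haR k h1 h2
      rw [this] at h3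
      cases h3

lemma aLeft_bridge (series : List (Option Int)) (cur : Int) (p L : Int) (hp : 0 ≤ p) :
    aLeftLoop series cur (PySem.List.pyRange (p - L) p 1) =
      ! (decide (0 ≤ p - L) && windowBad series cur (p - L) p) := by
  by_cases h0 : 0 ≤ p - L
  · rw [aLeft_eq_aRight series cur _ (by
      intro j hj
      rw [PySem.List.mem_pyRange_one] at hj
      omega)]
    rw [aRight_eq_not_windowBad series cur _ _ h0]
    have hd : decide (0 ≤ p - L) = true := by simpa using h0
    rw [hd, Bool.true_and]
  · have ha : p - L < 0 := by omega
    rw [aLeft_neg series cur _ _ ha (by omega)]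
    have hd : decide (0 ≤ p - L) = false := by simpa using h0
    rw [hd, Bool.false_and]
    rfl

lemma specEntry_eq_none (series : List (Option Int)) (L R : Int) (i : Nat) (hLR : ¬ ((i:Int) < L + R))
    (hv : series[((i:Int) - L).toNat]? = some none) :
    specEntry series L R i = none := by
  unfold specEntry
  rw [if_neg hLR, hv]

lemma specEntry_eq_some (series : List (Option Int)) (L R : Int) (i : Nat) (hLR : ¬ ((i:Int) < L + R))
    (cur : Int) (hv : series[((i:Int) - L).toNat]? = some (some cur)) :
    specEntry series L R i =
      (if 0 ≤ (i:Int) - L - L ∧ windowBad series cur ((i:Int) - L - L) ((i:Int) - L) = true then none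
       else if windowBad series cur ((i:Int) - L + 1) (min ((i:Int) - L + R + 1) (series.length:Int)) = true then none
       else some cur) := by
  unfold specEntry
  rw [if_neg hLR, hv]

lemma A_fold (series : List (Option Int)) (L R : Int) (hL : 0 ≤ L) (hR : 0 ≤ R) :
    ∀ (t : Int), L + R ≤ t →
    ∀ res : List (Option Int), res.length = series.length →
    (∀ i : Nat, i < series.length → res[i]? = some (if (i:Int) < t then specEntry series L R i else none)) →
    ∀ i : Nat, i < series.length →
    ((PySem.List.pyRange t (series.length:Int) 1).foldl (stepA series L R) res)[i]? =
      some (specEntry series L R i) := by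
  intro t
  induction hfuel : ((series.length:Int) - t).toNat generalizing t with
  | zero =>
    intro ht res _ hchar i hi
    rw [PySem.List.pyRange_one_eq_nil (by omega)]
    rw [List.foldl_nil, hchar i hi, if_pos (by omega)]
  | succ f ih =>
    intro ht res hlen hchar i hi
    have htn : t < (series.length:Int) := by omega
    rw [PySem.List.pyRange_one_cons htn, List.foldl_cons]
    have h0 : 0 ≤ t - L := by omega
    have hpn : (t - L).toNat < series.length := by omega
    refine ih (t + 1) (by omega) (by omega) _ (by rw [length_stepA]; exact hlen) ?_ i hi
    intro j hj
    have hstep : stepA series L R res t =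
        (match series[(t - L).toNat]? with
         | none => res
         | some none => res
         | some (some cur) =>
           if aLeftLoop series cur (PySem.List.pyRange (t - L - L) (t - L) 1) then
             if aRightLoop series cur (PySem.List.pyRange (t - L + 1) (min (t - L + R + 1) (series.length:Int)) 1) then
               PySem.List.pySetD res t (some cur)
             else res
           else res) := by
      simp only [stepA]
      rw [PySem.List.pyGet?_of_nonneg series h0]
    cases hv : series[(t - L).toNat]? with
    | none =>
      exfalso
      rw [List.getElem?_eq_none_iff] at hv
      omega
    | some v =>
      rw [hv] at hstep
      cases v with
      | none =>
        have hspec_t : ∀ _hjt : (j:Int) = t, specEntry series L R j = none := by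
          intro hjt
          exact specEntry_eq_none series L R j (by omega)
            (by rw [show (j:Int) - L = t - L by omega]; exact hv)
        have hstep' : stepA series L R res t = res := hstep
        rw [hstep', hchar j hj]
        by_cases hjt : (j:Int) < t
        · rw [if_pos hjt, if_pos (by omega)]
        · by_cases hjt1 : (j:Int) < t + 1
          · rw [if_neg hjt, if_pos hjt1, hspec_t (by omega)]
          · rw [if_neg hjt, if_neg hjt1]
      | some cur =>
        have hspec_t : ∀ _hjt : (j:Int) = t, specEntry series L R j =
            (if 0 ≤ t - L - L ∧ windowBad series cur (t - L - L) (t - L) = true then none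
             else if windowBad series cur (t - L + 1) (min (t - L + R + 1) (series.length:Int)) = true then none
             else some cur) := by
          intro hjt
          rw [specEntry_eq_some series L R j (by omega) cur
            (by rw [show (j:Int) - L = t - L by omega]; exact hv)]
          rw [show (j:Int) - L = t - L by omega]
        have hstep' : stepA series L R res t =
            (if aLeftLoop series cur (PySem.List.pyRange (t - L - L) (t - L) 1) = true then
               if aRightLoop series cur (PySem.List.pyRange (t - L + 1) (min (t - L + R + 1) (series.length:Int)) 1) = true then
                 PySem.List.pySetD res t (some cur)
               else res
             else res) := hstep
        rw [hstep']
        rw [aLeft_bridge series cur (t - L) L (by omega)]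
        by_cases hbadL : (decide (0 ≤ t - L - L) && windowBad series cur (t - L - L) (t - L)) = true
        · rw [hbadL]
          show res[j]? = _
          rw [hchar j hj]
          by_cases hjt : (j:Int) < t
          · rw [if_pos hjt, if_pos (by omega)]
          · by_cases hjt1 : (j:Int) < t + 1
            · rw [if_neg hjt, if_pos hjt1, hspec_t (by omega)]
              show some none = some (if 0 ≤ t - L - L ∧ windowBad series cur (t - L - L) (t - L) = true then none else _)
              rw [if_pos (by simpa using hbadL)]
            · rw [if_neg hjt, if_neg hjt1]
        · have hbadL' : (decide (0 ≤ t - L - L) && windowBad series cur (t - L - L) (t - L)) = false :=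
            Bool.eq_false_iff.mpr hbadL
          rw [hbadL']
          show (if aRightLoop series cur (PySem.List.pyRange (t - L + 1) (min (t - L + R + 1) (series.length:Int)) 1) = true
                then PySem.List.pySetD res t (some cur) else res)[j]? = _
          rw [aRight_eq_not_windowBad series cur _ _ (by omega)]
          cases hw : windowBad series cur (t - L + 1) (min (t - L + R + 1) (series.length:Int)) with
          | true =>
            show res[j]? = _
            rw [hchar j hj]
            by_cases hjt : (j:Int) < t
            · rw [if_pos hjt, if_pos (by omega)]
            · by_cases hjt1 : (j:Int) < t + 1
              · rw [if_neg hjt, if_pos hjt1, hspec_t (by omega)]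
                show some none = some (if 0 ≤ t - L - L ∧ windowBad series cur (t - L - L) (t - L) = true then none else _)
                rw [if_neg (by simpa using hbadL), if_pos (by rw [hw])]
              · rw [if_neg hjt, if_neg hjt1]
          | false =>
            show (PySem.List.pySetD res t (some cur))[j]? = _
            rw [PySem.List.pySetD_of_nonneg res (some cur) (by omega : (0:Int) ≤ t)]
            by_cases hjt : j = t.toNat
            · subst hjt
              rw [List.getElem?_set_self (by omega), if_pos (by omega), hspec_t (by omega)]
              show some (some cur) = some (if 0 ≤ t - L - L ∧ windowBad series cur (t - L - L) (t - L) = true then none else _)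
              rw [if_neg (by simpa using hbadL), if_neg (by rw [hw]; simp)]
            · rw [List.getElem?_set_ne (by omega), hchar j hj]
              by_cases hjlt : (j:Int) < t
              · rw [if_pos hjlt, if_pos (by omega)]
              · rw [if_neg hjlt, if_neg (by omega)]

lemma pivotlow_get (series : List (Option Int)) (L R : Int) (hL : 0 ≤ L) (hR : 0 ≤ R)
    (i : Nat) (hi : i < series.length) :
    (pivotlow series L R)[i]? = some (specEntry series L R i) := by
  rw [pivotlow_eq_fold]
  refine A_fold series L R hL hR (L + R) (by omega) _ (by simp) ?_ i hi
  intro j hj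
  rw [List.getElem?_replicate, if_pos hj]
  by_cases hjt : (j:Int) < L + R
  · rw [if_pos hjt]
    unfold specEntry
    rw [if_pos hjt]
  · rw [if_neg hjt]

lemma pivotlow_alt_get (series : List (Option Int)) (L R : Int) (hL : 0 ≤ L) (hR : 0 ≤ R)
    (i : Nat) (hi : i < series.length) :
    (pivotlow_alt series L R)[i]? = some (specEntry series L R i) := by
  simp only [pivotlow_alt]
  rw [PySem.List.getElem?_map_pyRange_zero _ series.length i hi]
  by_cases hLR : (i:Int) < L + R
  · rw [if_pos hLR]
    unfold specEntry
    rw [if_pos hLR]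
  · rw [if_neg hLR]
    have h0 : 0 ≤ (i:Int) - L := by omega
    set pN : Nat := ((i:Int) - L).toNat with hpNdef
    have hpcast : (pN:Int) = (i:Int) - L := by omega
    have hpn : pN < series.length := by omega
    rw [PySem.List.pyGet?_of_nonneg series h0]
    cases hv : series[pN]? with
    | none =>
      exfalso
      rw [List.getElem?_eq_none_iff] at hv
      omega
    | some v =>
      cases v with
      | none =>
        rw [specEntry_eq_none series L R i hLR hv]
      | some cur =>
        rw [specEntry_eq_some series L R i hLR cur hv]
        rw [← hpcast]
        have hprev : PySem.List.pyGetD (nearestLEBefore series) ((pN:Int)) (-1) = prevIdxSpec series pN := by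
          rw [PySem.List.pyGetD_natCast]
          rw [List.getD_eq_getElem?_getD, nearestLEBefore_get series pN hpn]
          rfl
        have hrevlen : (nearestLEBefore series.reverse).length = series.length := by
          rw [length_nearestLEBefore, List.length_reverse]
        have hrev : PySem.List.pyGetD (nearestLEBefore series.reverse)
            ((series.length:Int) - 1 - (pN:Int)) (-1) =
            prevIdxSpec series.reverse (series.length - 1 - pN) := by
          rw [show (series.length:Int) - 1 - (pN:Int) = ((series.length - 1 - pN : Nat) : Int) by omega]
          rw [PySem.List.pyGetD_natCast]
          rw [List.getD_eq_getElem?_getD, nearestLEBefore_get series.reverse _ (by rw [List.length_reverse]; omega)]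
          rfl
        have hnext : PySem.List.pyGetD
            ((PySem.List.pyRange 0 (series.length:Int) 1).map (fun p =>
              if 0 ≤ PySem.List.pyGetD (nearestLEBefore series.reverse) ((series.length:Int) - 1 - p) (-1) then
                (series.length:Int) - 1 - PySem.List.pyGetD (nearestLEBefore series.reverse) ((series.length:Int) - 1 - p) (-1)
              else -1)) ((pN:Int)) (-1) =
            (if 0 ≤ prevIdxSpec series.reverse (series.length - 1 - pN) then
              (series.length:Int) - 1 - prevIdxSpec series.reverse (series.length - 1 - pN)
             else -1) := by
          rw [PySem.List.pyGetD_map_pyRange_of_nonneg _ (series.length:Int) ((pN:Int)) (-1)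
            (by omega) (by omega)]
          rw [hrev]
        rw [hnext, hprev]
        have hc2 := next_window_iff series pN cur ((pN:Int) + R) hv
          (prevIdxSpec series.reverse (series.length - 1 - pN)) rfl
        have hc1 : (0 ≤ (pN:Int) - L ∧ (pN:Int) - L ≤ prevIdxSpec series pN) ↔
            (0 ≤ (pN:Int) - L ∧ windowBad series cur ((pN:Int) - L) ((pN:Int)) = true) := by
          constructor
          · rintro ⟨ha, hb⟩
            exact ⟨ha, (prev_window_iff series pN cur ((pN:Int) - L) hv ha).mp hb⟩
          · rintro ⟨ha, hb⟩
            exact ⟨ha, (prev_window_iff series pN cur ((pN:Int) - L) hv ha).mpr hb⟩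
        simp only [hc1, hc2]

lemma length_pivotlow_alt (series : List (Option Int)) (L R : Int) :
    (pivotlow_alt series L R).length = series.length := by
  simp only [pivotlow_alt]
  rw [List.length_map, PySem.List.length_pyRange_one]
  omega

-- ===== VERDICT (by name: the statement is the Claim_ definition above) =====
theorem pivotlow_spec : Claim_equal_pivotlow := by
  intro series L R _hdom hpre
  obtain ⟨hL, hR⟩ := hpre
  unfold Spec_pivotlow
  apply List.ext_getElem?
  intro i
  by_cases hi : i < series.length
  · rw [pivotlow_get series L R hL hR i hi, pivotlow_alt_get series L R hL hR i hi]
  · rw [List.getElem?_eq_none (by rw [length_pivotlow]; omega),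
        List.getElem?_eq_none (by rw [length_pivotlow_alt]; omega)]
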